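-- pv_equiv track=rewrite | github.com/GlebRadchenko/yul2venom | abi_decode_handler.py | parse_abi_decode_pattern
-- ===== SOURCE A (Python) =====
-- from typing import Optional, List, Tuple
--
-- def parse_abi_decode_pattern(function_name: str) -> Optional[Tuple[List[str], bool]]:
--     """
--     Parse ABI decode function name to extract parameter types.
--
--     Returns:
--         - Tuple of (type_list, is_memory) if it's an ABI decode function
--         - None if not an ABI decode pattern
--
--     Examples:
--         abi_decode_tuple_t_uint256t_uint256 -> (['uint256', 'uint256'], False)
--         abi_decode_tuple_t_addresst_uint256 -> (['address', 'uint256'], False)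
--         abi_decode_tuple_t_uint256_fromMemory -> (['uint256'], True)
--     """
--     # Check if it's an ABI decode pattern
--     if not function_name.startswith("abi_decode_tuple_t_"):
--         return None
--
--     # Check if it's a memory variant
--     is_memory = function_name.endswith("_fromMemory")
--
--     # Extract the types part
--     if is_memory:
--         # Remove prefix and suffix
--         types_part = function_name[len("abi_decode_tuple_t_"):-len("_fromMemory")]
--     else:
--         # Remove prefix
--         types_part = function_name[len("abi_decode_tuple_t_"):]
--
--     if not types_part:
--         return None
--
--     # Parse the types - they're concatenated with 't_' between them
--     # Examples:
--     # uint256t_uint256 -> ['uint256', 'uint256']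
--     # addresst_uint256 -> ['address', 'uint256']
--     # uint8t_uint16t_uint32 -> ['uint8', 'uint16', 'uint32']
--
--     # Split by 't_' to get individual types
--     # But be careful with complex types like array$_t_uint256_$dyn_memory_ptr
--
--     # Simple approach for common types
--     types = []
--     current = types_part
--
--     # Common EVM types that might appear
--     known_types = [
--         'uint256', 'uint128', 'uint64', 'uint32', 'uint16', 'uint8',
--         'int256', 'int128', 'int64', 'int32', 'int16', 'int8',
--         'address', 'bool', 'bytes32', 'bytes16', 'bytes8', 'bytes4',
--         'bytes', 'string'
--     ]
--
--     while current:
--         found = False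
--         for known_type in known_types:
--             if current.startswith(known_type):
--                 types.append(known_type)
--                 current = current[len(known_type):]
--                 # Skip 't_' separator if present
--                 if current.startswith('t_'):
--                     current = current[2:]
--                 found = True
--                 break
--
--         if not found:
--             # Check for complex types like array
--             if current.startswith('array'):
--                 # Find the end of the array type
--                 # For now, skip complex array types
--                 return None
--             else:
--                 # Unknown type pattern
--                 return None
--
--     if not types:
--         return None
--
--     return (types, is_memory)
-- ===== SOURCE B (Python) =====
-- # Recursive max-munch parser: picks the LONGEST matching known type via filter+max,
-- # instead of A's while loop with a found-flag and first-match priority scan.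
-- from typing import Optional, List, Tuple
--
-- KNOWN_TYPES = [
--     'uint256', 'uint128', 'uint64', 'uint32', 'uint16', 'uint8',
--     'int256', 'int128', 'int64', 'int32', 'int16', 'int8',
--     'address', 'bool', 'bytes32', 'bytes16', 'bytes8', 'bytes4',
--     'bytes', 'string'
-- ]
--
-- def _parse_types(s: str) -> Optional[List[str]]:
--     if not s:
--         return []
--     matches = [k for k in KNOWN_TYPES if s.startswith(k)]
--     if not matches:
--         return None
--     t = max(matches, key=len)
--     rest = s[len(t):]
--     if rest.startswith('t_'):
--         rest = rest[2:]
--     tail = _parse_types(rest)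
--     return None if tail is None else [t] + tail
--
-- def parse_abi_decode_pattern(function_name: str) -> Optional[Tuple[List[str], bool]]:
--     if not function_name.startswith("abi_decode_tuple_t_"):
--         return None
--     is_memory = function_name.endswith("_fromMemory")
--     body = function_name[len("abi_decode_tuple_t_"):]
--     if is_memory:
--         body = body[:-len("_fromMemory")]
--     if not body:
--         return None
--     types = _parse_types(body)
--     return None if types is None else (types, is_memory)
-- ===== Notes on version B (the rewrite author's own statement) =====
-- stated objective: alternative
-- what changed: A's while loop with a found-flag and an inner first-match priority scan over the known-type list is replaced by a recursive max-munch parser that filters the matching known types and takes the longest via max(key=len), proved equal because no earlier list entry is a prefix of a later one.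
import Mathlib
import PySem

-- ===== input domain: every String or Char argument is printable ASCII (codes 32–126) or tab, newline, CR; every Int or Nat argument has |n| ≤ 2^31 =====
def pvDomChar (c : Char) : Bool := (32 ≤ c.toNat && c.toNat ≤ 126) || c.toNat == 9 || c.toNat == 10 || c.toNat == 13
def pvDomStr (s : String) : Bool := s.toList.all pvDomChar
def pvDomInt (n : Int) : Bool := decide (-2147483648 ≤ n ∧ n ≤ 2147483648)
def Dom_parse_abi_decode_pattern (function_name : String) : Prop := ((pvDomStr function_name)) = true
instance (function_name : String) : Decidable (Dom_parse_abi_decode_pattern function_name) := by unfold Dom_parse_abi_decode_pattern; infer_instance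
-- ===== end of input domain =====

-- B replaces A's while loop (found-flag + first-match priority scan over the type list) by a
-- recursive max-munch parser that selects the LONGEST matching known type via filter+max;
-- objective: alternative (same cost), equivalence proved for the return value on all inputs.

-- ===== PORT A =====

-- the module-level known_types list of A (B's KNOWN_TYPES is the same constant)
def pvKnownTypes : List String :=
  ["uint256", "uint128", "uint64", "uint32", "uint16", "uint8",
   "int256", "int128", "int64", "int32", "int16", "int8",
   "address", "bool", "bytes32", "bytes16", "bytes8", "bytes4",
   "bytes", "string"]

-- every known type is nonempty (used only for termination of the two loops)
theorem pvKnownTypes_len : ∀ k ∈ pvKnownTypes, 0 < k.toList.length := by decide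

-- "skip 't_' separator if present" (A) / the same two lines in B
def pvStrip (r : List Char) : List Char :=
  if PySem.Chars.startswith r "t_".toList then r.drop 2 else r

theorem pvStrip_length_le (r : List Char) : (pvStrip r).length ≤ r.length := by
  unfold pvStrip; split <;> simp

-- A's while loop: scan known_types in order for the first prefix match (the for/found/break),
-- append it, strip the separator, continue; both failure branches (array / unknown) return None
def pvLoopA (current : List Char) (types : List String) : Option (List String) :=
  if hc : current = [] then some types
  else
    match hf : pvKnownTypes.find? (fun k => PySem.Chars.startswith current k.toList) with
    | some k => pvLoopA (pvStrip (current.drop k.toList.length)) (types ++ [k])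
    | none => none
termination_by current.length
decreasing_by
  have hk := List.mem_of_find?_eq_some hf
  have hkp : 0 < k.toList.length := pvKnownTypes_len k hk
  have hcl : 0 < current.length := List.length_pos_iff.mpr hc
  calc (pvStrip (current.drop k.toList.length)).length
      ≤ (current.drop k.toList.length).length := pvStrip_length_le _
    _ < current.length := by rw [List.length_drop]; omega

def parse_abi_decode_pattern (function_name : String) : Option (List String × Bool) :=
  if PySem.Str.startswith function_name "abi_decode_tuple_t_" = false then none
  else
    let is_memory := PySem.Str.endswith function_name "_fromMemory"
    -- len("abi_decode_tuple_t_") = 19, len("_fromMemory") = 11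
    let types_part :=
      if is_memory then PySem.List.slice function_name.toList (some 19) (some (-11))
      else PySem.List.slice function_name.toList (some 19) none
    if types_part = [] then none
    else
      match pvLoopA types_part [] with
      | none => none
      | some types => if types = [] then none else some (types, is_memory)

-- ===== PORT B =====

-- B's _parse_types: recursive max-munch — filter the known types that are prefixes,
-- take the longest (max(matches, key=len)), strip the separator, recurse
def pvParseTypes (s : List Char) : Option (List String) :=
  if hs : s = [] then some []
  else
    if hm : pvKnownTypes.filter (fun k => PySem.Chars.startswith s k.toList) = [] then none
    else
      match hx : PySem.List.max? (pvKnownTypes.filter (fun k => PySem.Chars.startswith s k.toList))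
          (fun k => k.toList.length) with
      | none => none   -- unreachable: max of a nonempty list (Python's max never raises here)
      | some t =>
        match pvParseTypes (pvStrip (s.drop t.toList.length)) with
        | none => none
        | some ts => some (t :: ts)
termination_by s.length
decreasing_by
  have ht := PySem.List.max?_mem hx
  have ht' := List.mem_filter.mp ht
  have hkp : 0 < t.toList.length := pvKnownTypes_len t ht'.1
  have hcl : 0 < s.length := List.length_pos_iff.mpr hs
  calc (pvStrip (s.drop t.toList.length)).length
      ≤ (s.drop t.toList.length).length := pvStrip_length_le _
    _ < s.length := by rw [List.length_drop]; omega

def parse_abi_decode_pattern_alt (function_name : String) : Option (List String × Bool) :=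
  if PySem.Str.startswith function_name "abi_decode_tuple_t_" = false then none
  else
    let is_memory := PySem.Str.endswith function_name "_fromMemory"
    -- body = function_name[19:]; if is_memory: body = body[:-11]
    let body0 := PySem.List.slice function_name.toList (some 19) none
    let body := if is_memory then PySem.List.slice body0 none (some (-11)) else body0
    if body = [] then none
    else
      match pvParseTypes body with
      | none => none
      | some types => some (types, is_memory)

-- ===== PRECONDITION & SPEC =====
def Spec_parse_abi_decode_pattern (function_name : String) (out : Option (List String × Bool)) : Prop := out = parse_abi_decode_pattern_alt function_name
instance (function_name : String) (out : Option (List String × Bool)) : Decidable (Spec_parse_abi_decode_pattern function_name out) := by unfold Spec_parse_abi_decode_pattern; infer_instance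

-- ===== CLAIM (what is proved, stated in full; the proofs are below) =====
def Claim_equal_parse_abi_decode_pattern : Prop := ∀ (function_name : String), Dom_parse_abi_decode_pattern function_name → Spec_parse_abi_decode_pattern function_name (parse_abi_decode_pattern function_name)

-- ===== LEMMAS AND PROOFS =====

-- no earlier entry of known_types is a prefix of a later one (priority order = longest match)
theorem pvKnownTypes_pairwise :
    pvKnownTypes.Pairwise (fun a b => ¬ a.toList <+: b.toList) := by decide

-- Python's max(_, key=len) keeps the head when the head's key dominates
theorem pv_max_head {a : String} {m : List String}
    (h : ∀ b ∈ m, b.toList.length ≤ a.toList.length) :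
    PySem.List.max? (a :: m) (fun k => k.toList.length) = some a := by
  induction m with
  | nil => rfl
  | cons b t ih =>
    have h1 : ¬ a.toList.length < b.toList.length := not_lt.mpr (h b (by simp))
    have step : PySem.List.max? (a :: b :: t) (fun k => k.toList.length)
        = PySem.List.max? (a :: t) (fun k => k.toList.length) := by
      simp only [PySem.List.max?, List.foldl_cons]
      rw [if_neg h1]
    rw [step]
    exact ih (fun c hc => h c (by simp [hc]))

-- A's first-match scan equals B's filter+longest on any pairwise-prefix-free type list
theorem pv_find_eq_max (s : List Char) (l : List String)
    (hp : l.Pairwise (fun a b => ¬ a.toList <+: b.toList)) :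
    l.find? (fun k => PySem.Chars.startswith s k.toList)
      = PySem.List.max? (l.filter (fun k => PySem.Chars.startswith s k.toList))
          (fun k => k.toList.length) := by
  induction l with
  | nil => rfl
  | cons a t ih =>
    rcases List.pairwise_cons.mp hp with ⟨ha, ht⟩
    by_cases h : PySem.Chars.startswith s a.toList = true
    · rw [List.find?_cons_of_pos (p := fun (k : String) => PySem.Chars.startswith s k.toList) h,
          List.filter_cons_of_pos (p := fun (k : String) => PySem.Chars.startswith s k.toList) h]
      symm
      apply pv_max_head
      intro b hb
      rcases List.mem_filter.mp hb with ⟨hbt, hbp⟩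
      have has : a.toList <+: s := (PySem.Chars.startswith_iff s a.toList).mp h
      have hbs : b.toList <+: s := (PySem.Chars.startswith_iff s b.toList).mp hbp
      rcases List.prefix_or_prefix_of_prefix has hbs with hab | hba
      · exact absurd hab (ha b hbt)
      · exact hba.length_le
    · have h' : PySem.Chars.startswith s a.toList = false := by
        cases hx : PySem.Chars.startswith s a.toList
        · rfl
        · exact absurd hx h
      rw [List.find?_cons_of_neg (p := fun (k : String) => PySem.Chars.startswith s k.toList) (by simp [h']),
          List.filter_cons_of_neg (p := fun (k : String) => PySem.Chars.startswith s k.toList) (by simp [h'])]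
      exact ih ht

-- unfolding equations for A's loop
theorem pvLoopA_nil (acc : List String) : pvLoopA [] acc = some acc := by
  rw [pvLoopA, dif_pos rfl]

theorem pvLoopA_none {s : List Char} (h0 : s ≠ [])
    (hf : pvKnownTypes.find? (fun k => PySem.Chars.startswith s k.toList) = none)
    (acc : List String) : pvLoopA s acc = none := by
  rw [pvLoopA, dif_neg h0]
  split
  · next k' heq => rw [hf] at heq; simp at heq
  · rfl

theorem pvLoopA_some {s : List Char} {k : String} (h0 : s ≠ [])
    (hf : pvKnownTypes.find? (fun k => PySem.Chars.startswith s k.toList) = some k)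
    (acc : List String) :
    pvLoopA s acc = pvLoopA (pvStrip (s.drop k.toList.length)) (acc ++ [k]) := by
  rw [pvLoopA, dif_neg h0]
  split
  · next k' heq => rw [hf] at heq; injection heq with h; subst h; rfl
  · next heq => rw [hf] at heq; simp at heq

-- unfolding equations for B's parser
theorem pvParseTypes_nil : pvParseTypes [] = some [] := by
  rw [pvParseTypes, dif_pos rfl]

theorem pvParseTypes_none {s : List Char} (h0 : s ≠ [])
    (hm : pvKnownTypes.filter (fun k => PySem.Chars.startswith s k.toList) = []) :
    pvParseTypes s = none := by
  rw [pvParseTypes, dif_neg h0, dif_pos hm]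

theorem pvParseTypes_some {s : List Char} {t : String} (h0 : s ≠ [])
    (hx : PySem.List.max? (pvKnownTypes.filter (fun k => PySem.Chars.startswith s k.toList))
        (fun k => k.toList.length) = some t) :
    pvParseTypes s
      = (pvParseTypes (pvStrip (s.drop t.toList.length))).map (fun ts => t :: ts) := by
  have hm : pvKnownTypes.filter (fun k => PySem.Chars.startswith s k.toList) ≠ [] := by
    intro hnil
    rw [(PySem.List.max?_eq_none_iff _ _).mpr hnil] at hx
    simp at hx
  rw [pvParseTypes, dif_neg h0, dif_neg hm]
  split
  · next heq => rw [hx] at heq; simp at heq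
  · next t' heq =>
      rw [hx] at heq; injection heq with h; subst h
      cases pvParseTypes (pvStrip (s.drop t.toList.length)) <;> rfl

-- the two loops agree (A threads an accumulator, B conses)
theorem pv_loop_eq (n : Nat) : ∀ s : List Char, s.length ≤ n → ∀ acc : List String,
    pvLoopA s acc = (pvParseTypes s).map (fun ts => acc ++ ts) := by
  induction n with
  | zero =>
    intro s hs acc
    have hs0 : s = [] := List.eq_nil_of_length_eq_zero (Nat.le_zero.mp hs)
    subst hs0
    rw [pvLoopA_nil, pvParseTypes_nil]
    simp
  | succ n ih =>
    intro s hs acc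
    by_cases h0 : s = []
    · subst h0; rw [pvLoopA_nil, pvParseTypes_nil]; simp
    · cases hfm : PySem.List.max? (pvKnownTypes.filter (fun k => PySem.Chars.startswith s k.toList))
          (fun k => k.toList.length) with
      | none =>
        have hm := (PySem.List.max?_eq_none_iff _ _).mp hfm
        have hfind : pvKnownTypes.find? (fun k => PySem.Chars.startswith s k.toList) = none := by
          rw [pv_find_eq_max s pvKnownTypes pvKnownTypes_pairwise, hfm]
        rw [pvLoopA_none h0 hfind, pvParseTypes_none h0 hm]
        rfl
      | some t =>
        have hfind : pvKnownTypes.find? (fun k => PySem.Chars.startswith s k.toList) = some t := by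
          rw [pv_find_eq_max s pvKnownTypes pvKnownTypes_pairwise, hfm]
        have ht := PySem.List.max?_mem hfm
        have ht' := List.mem_filter.mp ht
        have h1 : 0 < t.toList.length := pvKnownTypes_len t ht'.1
        have h2 : 0 < s.length := List.length_pos_iff.mpr h0
        have hlen : (pvStrip (s.drop t.toList.length)).length ≤ n := by
          have h3 := pvStrip_length_le (s.drop t.toList.length)
          rw [List.length_drop] at h3
          omega
        rw [pvLoopA_some h0 hfind, pvParseTypes_some h0 hfm,
            ih (pvStrip (s.drop t.toList.length)) hlen (acc ++ [t])]
        cases pvParseTypes (pvStrip (s.drop t.toList.length)) <;> simp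

-- B's parser never returns an empty list on nonempty input (covers A's final `if not types`)
theorem pv_parse_ne_nil {s : List Char} (hs : s ≠ []) {ts : List String}
    (h : pvParseTypes s = some ts) : ts ≠ [] := by
  cases hfm : PySem.List.max? (pvKnownTypes.filter (fun k => PySem.Chars.startswith s k.toList))
      (fun k => k.toList.length) with
  | none =>
    rw [pvParseTypes_none hs ((PySem.List.max?_eq_none_iff _ _).mp hfm)] at h
    simp at h
  | some t =>
    rw [pvParseTypes_some hs hfm] at h
    cases hr : pvParseTypes (pvStrip (s.drop t.toList.length)) with
    | none => rw [hr] at h; simp at h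
    | some ts' =>
      rw [hr] at h
      injection h with h'
      subst h'
      simp

-- the two slicings of the types part agree once the 19-char prefix is present
theorem pv_slice_eq (l : List Char) (hl : 19 ≤ l.length) :
    PySem.List.slice l (some 19) (some (-11))
      = PySem.List.slice (PySem.List.slice l (some 19) none) none (some (-11)) := by
  have h19 : PySem.List.clampIdx l.length 19 = 19 := by
    simp [PySem.List.clampIdx]
    omega
  have hm11 : ∀ n : ℕ, PySem.List.clampIdx n (-11) = n - 11 := by
    intro n
    simp [PySem.List.clampIdx]
    split_ifs <;> omega
  simp only [PySem.List.slice, h19, hm11, List.length_drop, List.length_take]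
  simp only [Nat.min_self, List.drop_zero, Nat.sub_zero]
  rw [List.take_take]
  congr 1
  omega

-- ===== VERDICT (by name: the statement is the Claim_ definition above) =====
theorem parse_abi_decode_pattern_spec : Claim_equal_parse_abi_decode_pattern := by
  unfold Claim_equal_parse_abi_decode_pattern
  intro fn _
  unfold Spec_parse_abi_decode_pattern parse_abi_decode_pattern parse_abi_decode_pattern_alt
  cases hsw : PySem.Str.startswith fn "abi_decode_tuple_t_" with
  | false => simp
  | true =>
    have hp : "abi_decode_tuple_t_".toList <+: fn.toList := by
      rw [← PySem.Chars.startswith_iff, ← PySem.Str.startswith_eq]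
      exact hsw
    have hlit : ("abi_decode_tuple_t_".toList).length = 19 := by decide
    have hlen : 19 ≤ fn.toList.length := by
      have := hp.length_le; omega
    simp only [Bool.true_eq_false, if_false]
    cases hm : PySem.Str.endswith fn "_fromMemory" with
    | false =>
      simp only [Bool.false_eq_true, if_false]
      by_cases hb : PySem.List.slice fn.toList (some 19) none = []
      · simp [hb]
      · simp only [if_neg hb]
        rw [pv_loop_eq (PySem.List.slice fn.toList (some 19) none).length _ le_rfl []]
        cases hp2 : pvParseTypes (PySem.List.slice fn.toList (some 19) none) with
        | none => simp
        | some ts =>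
          have hne := pv_parse_ne_nil hb hp2
          simp [hne]
    | true =>
      simp only [if_true]
      rw [pv_slice_eq fn.toList hlen]
      by_cases hb : PySem.List.slice (PySem.List.slice fn.toList (some 19) none) none (some (-11)) = []
      · simp [hb]
      · simp only [if_neg hb]
        rw [pv_loop_eq (PySem.List.slice (PySem.List.slice fn.toList (some 19) none) none (some (-11))).length _ le_rfl []]
        cases hp2 : pvParseTypes (PySem.List.slice (PySem.List.slice fn.toList (some 19) none) none (some (-11))) with
        | none => simp
        | some ts =>
          have hne := pv_parse_ne_nil hb hp2
          simp [hne]
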